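-- pv_equiv track=rewrite | github.com/btkling/advent-of-code-2025 | day04/day04.py | check_acceptable
-- ===== SOURCE A (Python) =====
-- PAPER_ROLL = '@'
--
-- SUCCESS = "x"
--
-- def get_neighbors(row, col, min_x, max_x, min_y, max_y):
--     neighbors = []
--     left = False
--     right = False
--     up = False
--     down = False
--
--     # can we go left
--     if col - 1 >= min_x:
--         left = True
--
--     # can we go right
--     if col + 1 <= max_x:
--         right = True
--
--     # can we go up
--     if row - 1 >= min_y:
--         up = True
--
--     # can we go down
--     if row + 1 <= max_y:
--         down = True
--
--     # UL UM UR
--     if up: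
--         # UM
--         neighbors.append([row-1, col])
--
--         # UL
--         if left:
--             neighbors.append([row-1, col-1])
--
--         # UR
--         if right:
--             neighbors.append([row-1, col+1])
--
--     # ML XX MR
--     if left:
--         # ML
--         neighbors.append([row, col-1])
--
--     if right:
--         # MR
--         neighbors.append([row, col+1])
--
--
--     # DL DM DR
--     if down:
--         # DM
--         neighbors.append([row+1, col])
--
--         if left:
--             # DL
--             neighbors.append([row+1, col-1])
--         if right:
--             # DR:
--             neighbors.append([row+1, col+1])
--
--     return neighbors
--
-- def check_acceptable(array, row, col):
--
--     if array[row][col] != PAPER_ROLL: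
--         return array[row][col]
--     else:
--
--         min_x = 0
--         min_y = 0
--         max_x = len(array[row]) - 1
--         max_y = len(array) - 1
--
--         neighbors = get_neighbors(row, col, min_x, max_x, min_y, max_y)
--
--         adjacent_rolls = 0
--
--         for neighbor in neighbors:
--             r, c = neighbor[0], neighbor[1]
--             if array[r][c] == PAPER_ROLL:
--                 adjacent_rolls += 1
--
--         if adjacent_rolls < 4:
--             return SUCCESS
--         else:
--             return PAPER_ROLL
-- ===== SOURCE B (Python) =====
-- PAPER_ROLL = '@'
--
-- SUCCESS = "x"
--
-- def check_acceptable(array, row, col):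
--     cell = array[row][col]
--     if cell != PAPER_ROLL:
--         return cell
--     width = len(array[row])
--     lo, hi = max(col - 1, 0), min(col + 2, width)
--     rolls = -1  # the centre cell is '@' and gets counted by its own row's window
--     for r in range(max(row - 1, 0), min(row + 2, len(array))):
--         rolls += array[r][lo:hi].count(PAPER_ROLL)
--     return SUCCESS if rolls < 4 else PAPER_ROLL
-- ===== Notes on version B (the rewrite author's own statement) =====
-- stated objective: simpler
-- what changed: Replaces the neighbour-enumeration (get_neighbors building an explicit list of up to 8 coordinates that is then scanned) by window slicing: for each of the up-to-3 clipped rows it counts '@' in the slice [max(col-1,0):min(col+2,width)] with list.count, starting the tally at -1 to cancel the centre cell.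
-- outside the precondition, e.g. on check_acceptable([['@', '@', '@']], -1, 1): A returns '@', B returns 'x'
import Mathlib
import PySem

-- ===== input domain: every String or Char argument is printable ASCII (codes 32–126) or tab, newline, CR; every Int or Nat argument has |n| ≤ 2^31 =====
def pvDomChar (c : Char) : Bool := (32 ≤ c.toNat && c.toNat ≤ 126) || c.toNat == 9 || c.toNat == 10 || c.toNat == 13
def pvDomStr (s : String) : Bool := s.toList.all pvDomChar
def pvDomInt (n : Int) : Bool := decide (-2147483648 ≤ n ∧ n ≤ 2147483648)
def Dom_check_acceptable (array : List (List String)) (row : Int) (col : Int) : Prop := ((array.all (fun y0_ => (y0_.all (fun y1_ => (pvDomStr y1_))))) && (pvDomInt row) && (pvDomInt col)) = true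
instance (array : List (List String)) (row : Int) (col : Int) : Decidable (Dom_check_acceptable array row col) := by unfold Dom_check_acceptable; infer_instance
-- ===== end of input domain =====

-- B replaces A's neighbour enumeration by window slicing: count '@' in the clipped 3-column slice of each
-- of the up-to-3 clipped rows, starting the tally at -1 to cancel the centre cell (simpler, same cost).

-- ===== PORT A =====
-- Python's four direction booleans (left/right/up/down) are inlined as the conditions they name; the
-- sequence of appends is written as ordered concatenation of conditional singletons (same list, same order).
def get_neighbors (row col min_x max_x min_y max_y : Int) : List (Int × Int) :=
  (if row - 1 ≥ min_y then
      [(row - 1, col)]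
      ++ (if col - 1 ≥ min_x then [(row - 1, col - 1)] else [])
      ++ (if col + 1 ≤ max_x then [(row - 1, col + 1)] else [])
    else [])
  ++ (if col - 1 ≥ min_x then [(row, col - 1)] else [])
  ++ (if col + 1 ≤ max_x then [(row, col + 1)] else [])
  ++ (if row + 1 ≤ max_y then
      [(row + 1, col)]
      ++ (if col - 1 ≥ min_x then [(row + 1, col - 1)] else [])
      ++ (if col + 1 ≤ max_x then [(row + 1, col + 1)] else [])
    else [])

def check_acceptable (array : List (List String)) (row : Int) (col : Int) : String :=
  let cell := (PySem.List.pyGet? ((PySem.List.pyGet? array row).getD []) col).getD ""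
  if cell ≠ "@" then cell
  else
    let min_x : Int := 0
    let min_y : Int := 0
    let max_x : Int := (((PySem.List.pyGet? array row).getD []).length : Int) - 1
    let max_y : Int := (array.length : Int) - 1
    let neighbors := get_neighbors row col min_x max_x min_y max_y
    let adjacent_rolls : Int := neighbors.foldl (fun acc nb =>
      if (PySem.List.pyGet? ((PySem.List.pyGet? array nb.1).getD []) nb.2).getD "" = "@" then acc + 1 else acc) 0
    if adjacent_rolls < 4 then "x" else "@"

-- ===== PORT B =====
def check_acceptable_alt (array : List (List String)) (row : Int) (col : Int) : String :=
  let cell := (PySem.List.pyGet? ((PySem.List.pyGet? array row).getD []) col).getD ""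
  if cell ≠ "@" then cell
  else
    let width : Int := (((PySem.List.pyGet? array row).getD []).length : Int)
    let lo : Int := max (col - 1) 0
    let hi : Int := min (col + 2) width
    let rolls : Int := (PySem.List.pyRange (max (row - 1) 0) (min (row + 2) (array.length : Int)) 1).foldl
      (fun acc r => acc + ((PySem.List.count (PySem.List.slice ((PySem.List.pyGet? array r).getD []) (some lo) (some hi)) "@" : Nat) : Int)) (-1)
    if rolls < 4 then "x" else "@"

-- ===== PRECONDITION & SPEC =====
-- Pre_ excludes: out-of-range row/col and '@'-cells whose neighbour rows are too short (A raises IndexError there),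
-- and negative row/col on an '@' cell, where A's value mixes raw-index bounds checks with Python's
-- negative-index wraparound accesses — a corner no one would specify (cite in claim.json).
def Pre_check_acceptable (array : List (List String)) (row : Int) (col : Int) : Prop :=
  -(array.length : Int) ≤ row ∧ row < (array.length : Int) ∧
  -((((PySem.List.pyGet? array row).getD []).length : Int)) ≤ col ∧
  col < (((PySem.List.pyGet? array row).getD []).length : Int) ∧
  ((PySem.List.pyGet? ((PySem.List.pyGet? array row).getD []) col).getD "" = "@" →
    0 ≤ row ∧ 0 ≤ col ∧
    ∀ r ∈ ([row - 1, row + 1] : List Int), 0 ≤ r → r < (array.length : Int) →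
      min (col + 2) ((((PySem.List.pyGet? array row).getD []).length : Int)) ≤ (((PySem.List.pyGet? array r).getD []).length : Int))
instance (array : List (List String)) (row : Int) (col : Int) : Decidable (Pre_check_acceptable array row col) := by
  unfold Pre_check_acceptable; infer_instance

def pvWitness_check_acceptable : List (List String) × Int × Int := ([["@"]], 0, 0)

def Spec_check_acceptable (array : List (List String)) (row : Int) (col : Int) (out : String) : Prop := out = check_acceptable_alt array row col
instance (array : List (List String)) (row : Int) (col : Int) (out : String) : Decidable (Spec_check_acceptable array row col out) := by unfold Spec_check_acceptable; infer_instance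

-- ===== CLAIM (what is proved, stated in full; the proofs are below) =====
def Claim_equal_check_acceptable : Prop := ∀ (array : List (List String)) (row : Int) (col : Int), Dom_check_acceptable array row col → Pre_check_acceptable array row col → Spec_check_acceptable array row col (check_acceptable array row col)

-- ===== LEMMAS AND PROOFS =====

-- ys[lo:hi] is the element map over the index range, when the bounds are within ys.

theorem pvSliceMap (ys : List String) (lo hi : Int) (h0 : 0 ≤ lo) (h1 : lo ≤ hi) (h2 : hi ≤ (ys.length : Int)) :
    PySem.List.slice ys (some lo) (some hi) = (PySem.List.pyRange lo hi 1).map (fun c => (PySem.List.pyGet? ys c).getD "") := by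
  rw [PySem.List.slice_toNat ys h0 (by omega), PySem.List.pyRange_one, List.map_map]
  apply List.ext_getElem
  · simp; omega
  · intro i hi1 hi2
    simp only [List.getElem_take, List.getElem_drop, List.getElem_map, List.getElem_range, Function.comp]
    have hidx : lo + (i : Int) = ((lo.toNat + i : Nat) : Int) := by push_cast; omega
    rw [hidx, PySem.List.pyGet?_natCast, List.getElem?_eq_getElem (by simp at hi1; omega)]
    rfl

theorem pvSliceCount (ys : List String) (lo hi : Int) (h0 : 0 ≤ lo) (h1 : lo ≤ hi) (h2 : hi ≤ (ys.length : Int)) :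
    ((PySem.List.count (PySem.List.slice ys (some lo) (some hi)) "@" : Nat) : Int)
    = (PySem.List.pyRange lo hi 1).foldl (fun acc c => if (PySem.List.pyGet? ys c).getD "" = "@" then acc + 1 else acc) 0 := by
  rw [PySem.List.foldl_ite_add_one, pvSliceMap ys lo hi h0 h1 h2, PySem.List.count_eq,
    List.count_eq_countP, List.countP_map, zero_add]
  congr 1

-- clipped range = conditional edge singletons around x
theorem pvClipRange (x n : Int) (h0 : 0 ≤ x) (h1 : x < n) :
    PySem.List.pyRange (max (x - 1) 0) (min (x + 2) n) 1
    = (if 0 ≤ x - 1 then [x - 1] else []) ++ [x] ++ (if x + 1 ≤ n - 1 then [x + 1] else []) := by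
  by_cases hu : 0 ≤ x - 1 <;> by_cases hd : x + 1 ≤ n - 1 <;>
    simp only [hu, hd, if_true, if_false] <;>
    rw [show max (x - 1) 0 = (if 0 ≤ x - 1 then x - 1 else x) from by split <;> omega,
        show min (x + 2) n = (if x + 1 ≤ n - 1 then x + 2 else x + 1) from by split <;> omega]
  · rw [if_pos hu, if_pos hd, PySem.List.pyRange_one_cons (by omega),
      PySem.List.pyRange_one_cons (by omega), PySem.List.pyRange_one_cons (by omega),
      PySem.List.pyRange_one_eq_nil (by omega)]
    norm_num
  · rw [if_pos hu, if_neg hd, PySem.List.pyRange_one_cons (by omega),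
      PySem.List.pyRange_one_cons (by omega), PySem.List.pyRange_one_eq_nil (by omega)]
    norm_num
  · rw [if_neg hu, if_pos hd, PySem.List.pyRange_one_cons (by omega),
      PySem.List.pyRange_one_cons (by omega), PySem.List.pyRange_one_eq_nil (by omega)]
    norm_num
  · rw [if_neg hu, if_neg hd, PySem.List.pyRange_one_cons (by omega),
      PySem.List.pyRange_one_eq_nil (by omega)]
    norm_num


-- A's neighbour-list count equals the clipped double window fold (centre cancelled by the -1 start).
set_option maxHeartbeats 1600000 in
theorem pvWindowHelper (P : Int → Int → Prop) [inst : ∀ r c : Int, Decidable (P r c)]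
    (row col n L : Int) (hr0 : 0 ≤ row) (h2 : row < n) (hc0 : 0 ≤ col) (h4 : col < L) (hP : P row col) :
    ((get_neighbors row col 0 (L - 1) 0 (n - 1)).foldl
      (fun acc nb => if P nb.1 nb.2 then acc + 1 else acc) (0 : Int))
    = (PySem.List.pyRange (max (row - 1) 0) (min (row + 2) n) 1).foldl
        (fun acc r => acc + (PySem.List.pyRange (max (col - 1) 0) (min (col + 2) L) 1).foldl
          (fun acc2 c => if P r c then acc2 + 1 else acc2) 0) (-1) := by
  rw [pvClipRange row n hr0 h2]
  simp only [pvClipRange col L hc0 h4]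
  by_cases h_u : (0:Int) ≤ row - 1 <;>
  by_cases h_d : row + 1 ≤ n - 1 <;>
  by_cases h_l : (0:Int) ≤ col - 1 <;>
  by_cases h_r : col + 1 ≤ L - 1 <;>
  · simp only [get_neighbors, ge_iff_le, h_u, h_d, h_l, h_r, if_true, if_false,
      List.nil_append, List.cons_append, List.append_nil,
      List.foldl_cons, List.foldl_nil, if_pos hP]
    first
    | (split_ifs <;> omega)
    | omega

-- ===== VERDICT (by name: the statement is the Claim_ definition above) =====
theorem check_acceptable_spec : Claim_equal_check_acceptable := by
  intro array row col _ hpre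
  obtain ⟨h1, h2, h3, h4, h5⟩ := hpre
  unfold Spec_check_acceptable check_acceptable check_acceptable_alt
  by_cases hcell : (PySem.List.pyGet? ((PySem.List.pyGet? array row).getD []) col).getD "" = "@"
  · obtain ⟨hr0, hc0, hlen⟩ := h5 hcell
    have hB : (PySem.List.pyRange (max (row - 1) 0) (min (row + 2) (array.length : Int)) 1).foldl
        (fun acc r => acc + ((PySem.List.count (PySem.List.slice ((PySem.List.pyGet? array r).getD [])
          (some (max (col - 1) 0)) (some (min (col + 2) ((((PySem.List.pyGet? array row).getD []).length : Int))))) "@" : Nat) : Int)) (-1)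
      = (PySem.List.pyRange (max (row - 1) 0) (min (row + 2) (array.length : Int)) 1).foldl
        (fun acc r => acc + (PySem.List.pyRange (max (col - 1) 0) (min (col + 2) ((((PySem.List.pyGet? array row).getD []).length : Int))) 1).foldl
          (fun acc2 c => if (PySem.List.pyGet? ((PySem.List.pyGet? array r).getD []) c).getD "" = "@" then acc2 + 1 else acc2) 0) (-1) := by
      apply PySem.List.foldl_congr_mem
      intro acc r hr
      rw [PySem.List.mem_pyRange_one] at hr
      congr 1
      have hlr : ((((PySem.List.pyGet? array r).getD []).length : Int)) ≥ min (col + 2) ((((PySem.List.pyGet? array row).getD []).length : Int)) := by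
        by_cases hrr : r = row
        · subst hrr; omega
        · have : r = row - 1 ∨ r = row + 1 := by omega
          exact hlen r (by rcases this with h | h <;> simp [h]) (by omega) (by omega)
      exact pvSliceCount _ _ _ (by omega) (by omega) (by omega)
    have hA := pvWindowHelper
      (fun r c => (PySem.List.pyGet? ((PySem.List.pyGet? array r).getD []) c).getD "" = "@")
      row col (array.length : Int) (((PySem.List.pyGet? array row).getD []).length : Int)
      hr0 h2 hc0 h4 hcell
    simp only [hcell, ne_eq, not_true_eq_false, if_false, hA, hB]
  · simp only [ne_eq, hcell, not_false_eq_true, if_true]
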